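-- pv_equiv track=rewrite | github.com/Ahmed1262005/PoseRecSys | scripts/hierarchical_clustering.py | get_brand_tier
-- ===== SOURCE A (Python) =====
-- from collections import Counter
--
-- LUXURY_BRANDS = {'GUCCI', 'Tom Ford', 'Dior', 'Zegna', 'Off-White', 'Palm Angels'}
--
-- PREMIUM_BRANDS = {'Hugo Boss', 'Calvin Klein', 'Ralph Lauren', 'Tommy Hilfiger', 'Ted Baker'}
--
-- CONTEMPORARY_BRANDS = {'Zara', 'Mango', 'Banana Republic', 'Suitsupply', 'Perry Ellis'}
--
-- FAST_FASHION_BRANDS = {'Uniqlo', 'Pacsun', 'Pull & Bear', 'H&M'}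
--
-- STREETWEAR_BRANDS = {'TRUE RELIGION', 'Off-White', 'Palm Angels', 'Cotopaxi'}
--
-- def get_brand_tier(brands):
--     brand_counts = Counter(brands)
--     for brand, _ in brand_counts.most_common():
--         if brand in LUXURY_BRANDS:
--             return "Luxury"
--         elif brand in STREETWEAR_BRANDS:
--             return "Streetwear"
--         elif brand in PREMIUM_BRANDS:
--             return "Premium"
--         elif brand in CONTEMPORARY_BRANDS:
--             return "Contemporary"
--         elif brand in FAST_FASHION_BRANDS:
--             return "Essential"
--     return "Mixed"
-- ===== SOURCE B (Python) =====
-- from collections import Counter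
--
-- LUXURY_BRANDS = {'GUCCI', 'Tom Ford', 'Dior', 'Zegna', 'Off-White', 'Palm Angels'}
-- PREMIUM_BRANDS = {'Hugo Boss', 'Calvin Klein', 'Ralph Lauren', 'Tommy Hilfiger', 'Ted Baker'}
-- CONTEMPORARY_BRANDS = {'Zara', 'Mango', 'Banana Republic', 'Suitsupply', 'Perry Ellis'}
-- FAST_FASHION_BRANDS = {'Uniqlo', 'Pacsun', 'Pull & Bear', 'H&M'}
-- STREETWEAR_BRANDS = {'TRUE RELIGION', 'Off-White', 'Palm Angels', 'Cotopaxi'}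
--
-- # tier precedence, highest first (Off-White / Palm Angels resolve to Luxury)
-- TIER_ORDER = [
--     (LUXURY_BRANDS, "Luxury"),
--     (STREETWEAR_BRANDS, "Streetwear"),
--     (PREMIUM_BRANDS, "Premium"),
--     (CONTEMPORARY_BRANDS, "Contemporary"),
--     (FAST_FASHION_BRANDS, "Essential"),
-- ]
--
-- def get_brand_tier(brands):
--     counts = Counter(brands)
--     candidates = [(b, c) for b, c in counts.items()
--                   if any(b in s for s, _ in TIER_ORDER)]
--     if not candidates:
--         return "Mixed"
--     best = max(candidates, key=lambda bc: bc[1])[0]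
--     return next(tier for s, tier in TIER_ORDER if best in s)
-- ===== Notes on version B (the rewrite author's own statement) =====
-- stated objective: alternative
-- what changed: B drops most_common's full sort of the counter items: it filters the items once to the brands in any tier set of a precedence table and takes max by count (Python max returns the first maximal, matching the stable sort's choice), then looks the winner's tier up in the same table instead of an if/elif chain.
import Mathlib
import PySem

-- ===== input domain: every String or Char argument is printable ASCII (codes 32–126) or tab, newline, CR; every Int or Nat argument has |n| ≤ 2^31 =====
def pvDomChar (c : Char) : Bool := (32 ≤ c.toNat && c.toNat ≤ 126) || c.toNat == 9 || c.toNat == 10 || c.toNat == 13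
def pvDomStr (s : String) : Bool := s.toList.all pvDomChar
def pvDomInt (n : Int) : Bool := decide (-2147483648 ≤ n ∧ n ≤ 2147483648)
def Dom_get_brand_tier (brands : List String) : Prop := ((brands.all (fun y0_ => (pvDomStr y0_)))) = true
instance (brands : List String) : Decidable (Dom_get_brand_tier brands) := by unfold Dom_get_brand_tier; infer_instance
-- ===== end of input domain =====

-- ===== PORT A =====
-- B replaces A's full sort of the counter items (`most_common`) by a single
-- max-by-count pass over the matching candidates; equivalence of return values.
def pvLUXURY_BRANDS : PySem.Set String :=
  PySem.Set.ofList ["GUCCI", "Tom Ford", "Dior", "Zegna", "Off-White", "Palm Angels"]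
def pvPREMIUM_BRANDS : PySem.Set String :=
  PySem.Set.ofList ["Hugo Boss", "Calvin Klein", "Ralph Lauren", "Tommy Hilfiger", "Ted Baker"]
def pvCONTEMPORARY_BRANDS : PySem.Set String :=
  PySem.Set.ofList ["Zara", "Mango", "Banana Republic", "Suitsupply", "Perry Ellis"]
def pvFAST_FASHION_BRANDS : PySem.Set String :=
  PySem.Set.ofList ["Uniqlo", "Pacsun", "Pull & Bear", "H&M"]
def pvSTREETWEAR_BRANDS : PySem.Set String :=
  PySem.Set.ofList ["TRUE RELIGION", "Off-White", "Palm Angels", "Cotopaxi"]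

-- A's for-loop over most_common(): first brand in any tier set decides; else "Mixed".
def pvScanA : List (String × Int) → String
  | [] => "Mixed"
  | (brand, _) :: rest =>
    if PySem.Set.contains pvLUXURY_BRANDS brand then "Luxury"
    else if PySem.Set.contains pvSTREETWEAR_BRANDS brand then "Streetwear"
    else if PySem.Set.contains pvPREMIUM_BRANDS brand then "Premium"
    else if PySem.Set.contains pvCONTEMPORARY_BRANDS brand then "Contemporary"
    else if PySem.Set.contains pvFAST_FASHION_BRANDS brand then "Essential"
    else pvScanA rest

-- most_common() = sorted(items, key=count, reverse=True) (stable)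
def get_brand_tier (brands : List String) : String :=
  let brand_counts := PySem.Dict.counter brands
  pvScanA (PySem.List.sorted brand_counts.items (fun p => p.2) true)

-- ===== PORT B =====
-- tier precedence table, highest first
def pvTIER_ORDER : List (PySem.Set String × String) :=
  [(pvLUXURY_BRANDS, "Luxury"), (pvSTREETWEAR_BRANDS, "Streetwear"),
   (pvPREMIUM_BRANDS, "Premium"), (pvCONTEMPORARY_BRANDS, "Contemporary"),
   (pvFAST_FASHION_BRANDS, "Essential")]

-- any(b in s for s, _ in TIER_ORDER)
def pvMatches (b : String) : Bool :=
  pvTIER_ORDER.any (fun st => PySem.Set.contains st.1 b)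

-- next(tier for s, tier in TIER_ORDER if best in s); the none branch is where
-- Python's next would raise StopIteration — unreachable from get_brand_tier_alt,
-- since every candidate matches some tier set.
def pvLookupTier (b : String) : String :=
  match pvTIER_ORDER.find? (fun st => PySem.Set.contains st.1 b) with
  | some st => st.2
  | none => "Mixed"

def get_brand_tier_alt (brands : List String) : String :=
  let counts := PySem.Dict.counter brands
  let candidates := counts.items.filter (fun p => pvMatches p.1)
  match PySem.List.max? candidates (fun p => p.2) with
  | none => "Mixed"
  | some best => pvLookupTier best.1

-- ===== PRECONDITION & SPEC =====
def Spec_get_brand_tier (brands : List String) (out : String) : Prop := out = get_brand_tier_alt brands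
instance (brands : List String) (out : String) : Decidable (Spec_get_brand_tier brands out) := by unfold Spec_get_brand_tier; infer_instance

-- ===== CLAIM (what is proved, stated in full; the proofs are below) =====
def Claim_equal_get_brand_tier : Prop := ∀ (brands : List String), Dom_get_brand_tier brands → Spec_get_brand_tier brands (get_brand_tier brands)

-- ===== LEMMAS AND PROOFS =====

-- A's if/elif chain as a function of the chosen brand.
def pvTier (b : String) : String :=
  if PySem.Set.contains pvLUXURY_BRANDS b then "Luxury"
  else if PySem.Set.contains pvSTREETWEAR_BRANDS b then "Streetwear"
  else if PySem.Set.contains pvPREMIUM_BRANDS b then "Premium"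
  else if PySem.Set.contains pvCONTEMPORARY_BRANDS b then "Contemporary"
  else "Essential"

-- A's scan returns the tier of the first matching pair (or "Mixed").
theorem pvScanA_eq_find (l : List (String × Int)) :
    pvScanA l = match l.find? (fun p => pvMatches p.1) with
      | none => "Mixed"
      | some p => pvTier p.1 := by
  induction l with
  | nil => rfl
  | cons p rest ih =>
    obtain ⟨b, c⟩ := p
    by_cases h : pvMatches b = true
    · simp only [List.find?_cons, h]
      have h' := h
      unfold pvMatches pvTIER_ORDER at h'
      simp only [List.any_cons, List.any_nil, Bool.or_false, Bool.or_eq_true_iff] at h'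
      simp only [pvScanA, pvTier]
      split_ifs <;> simp_all
    · simp only [List.find?_cons, h]
      simp only [Bool.not_eq_true] at h
      unfold pvMatches pvTIER_ORDER at h
      simp only [List.any_cons, List.any_nil, Bool.or_false, Bool.or_eq_false_iff] at h
      simp only [pvScanA, h.1, h.2.1, h.2.2.1, h.2.2.2.1, h.2.2.2.2,
        Bool.false_eq_true, if_false, ih]

-- insertBy (descending comparator) puts x in front when it beats every element.
theorem pvInsert_front {α κ : Type} [LinearOrder κ] (key : α → κ) (x : α)
    (l : List α) (h : ∀ z ∈ l, key z < key x) :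
    PySem.List.insertBy (fun a b => decide (key b < key a)) x l = x :: l := by
  cases l with
  | nil => rfl
  | cons y ys => simp [PySem.List.insertBy, h y (by simp)]

-- filtering past an inserted element the filter drops.
theorem pvFilter_insert_neg {α κ : Type} [LinearOrder κ] (key : α → κ)
    (P : α → Bool) (x : α) (hx : P x = false) (l : List α) :
    (PySem.List.insertBy (fun a b => decide (key b < key a)) x l).filter P = l.filter P := by
  induction l with
  | nil => simp [PySem.List.insertBy, hx]
  | cons y ys ih =>
    simp only [PySem.List.insertBy]
    split
    · simp [List.filter_cons, hx]
    · simp [List.filter_cons, ih]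

-- filtering commutes with inserting a kept element into a descending list.
theorem pvFilter_insert_pos {α κ : Type} [LinearOrder κ] (key : α → κ)
    (P : α → Bool) (x : α) (hx : P x = true) (l : List α)
    (hs : l.Pairwise (fun a b => key b ≤ key a)) :
    (PySem.List.insertBy (fun a b => decide (key b < key a)) x l).filter P
      = PySem.List.insertBy (fun a b => decide (key b < key a)) x (l.filter P) := by
  induction l with
  | nil => simp [PySem.List.insertBy, hx]
  | cons y ys ih =>
    rcases List.pairwise_cons.mp hs with ⟨hy, hys⟩
    simp only [PySem.List.insertBy]
    split
    · rename_i hcmp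
      have hyx : key y < key x := of_decide_eq_true hcmp
      by_cases hPy : P y = true
      · simp only [List.filter_cons, hx, hPy, if_pos]
        rw [pvInsert_front key x (y :: ys.filter P) (by
          intro z hz
          rcases List.mem_cons.mp hz with rfl | hz
          · exact hyx
          · exact lt_of_le_of_lt (hy z (List.mem_of_mem_filter hz)) hyx)]
      · simp only [List.filter_cons, hx, hPy, if_pos, Bool.false_eq_true, if_false]
        rw [pvInsert_front key x (ys.filter P) (by
          intro z hz
          exact lt_of_le_of_lt (hy z (List.mem_of_mem_filter hz)) hyx)]
    · rename_i hcmp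
      by_cases hPy : P y = true
      · simp only [List.filter_cons, hPy, if_pos, ih hys, PySem.List.insertBy]
        simp [hcmp]
      · simp only [List.filter_cons, hPy, Bool.false_eq_true, if_false]
        exact ih hys

-- stability: filter commutes with the descending stable sort.
theorem pvFilter_sorted {α κ : Type} [LinearOrder κ] (key : α → κ)
    (P : α → Bool) (xs : List α) :
    (PySem.List.sorted xs key true).filter P = PySem.List.sorted (xs.filter P) key true := by
  induction xs using List.reverseRecOn with
  | nil => rfl
  | append_singleton xs x ih =>
    have hstep : ∀ (ys : List α), PySem.List.sorted (ys ++ [x]) key true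
        = PySem.List.insertBy (fun a b => decide (key b < key a)) x
            (PySem.List.sorted ys key true) := by
      intro ys
      rw [PySem.List.sorted_rev_eq_foldl_insertBy, PySem.List.sorted_rev_eq_foldl_insertBy,
        List.foldl_append]
      rfl
    rw [hstep]
    by_cases hx : P x = true
    · rw [pvFilter_insert_pos key P x hx _ (PySem.List.sorted_pairwise_rev xs key), ih,
        List.filter_append, ← hstep]
      simp [hx]
    · rw [pvFilter_insert_neg key P x (by simpa using hx), ih, List.filter_append]
      simp [hx]

-- head of the descending stable sort is Python's max (first maximal element).
theorem pvHead_sorted {α κ : Type} [LinearOrder κ] (key : α → κ) (ys : List α) :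
    (PySem.List.sorted ys key true).head? = PySem.List.max? ys key := by
  induction ys using List.reverseRecOn with
  | nil => rfl
  | append_singleton ys x ih =>
    have hstep : PySem.List.sorted (ys ++ [x]) key true
        = PySem.List.insertBy (fun a b => decide (key b < key a)) x
            (PySem.List.sorted ys key true) := by
      rw [PySem.List.sorted_rev_eq_foldl_insertBy, PySem.List.sorted_rev_eq_foldl_insertBy,
        List.foldl_append]
      rfl
    have hmax : PySem.List.max? (ys ++ [x]) key
        = match PySem.List.max? ys key with
          | none => some x
          | some m => if key m < key x then some x else some m := by
      simp only [PySem.List.max?, List.foldl_append, List.foldl_cons, List.foldl_nil]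
      try rfl
    rw [hstep, hmax, ← ih]
    cases hsy : PySem.List.sorted ys key true with
    | nil => rfl
    | cons m t =>
      by_cases h : key m < key x <;> simp [PySem.List.insertBy, h]

-- the table lookup agrees with A's if/elif chain on every matching brand.
theorem pvLookup_eq_tier (b : String) (hb : pvMatches b = true) :
    pvLookupTier b = pvTier b := by
  unfold pvMatches pvTIER_ORDER at hb
  simp only [List.any_cons, List.any_nil, Bool.or_eq_true_iff] at hb
  unfold pvLookupTier pvTIER_ORDER pvTier
  simp only [List.find?]
  split_ifs <;> simp_all

-- ===== VERDICT (by name: the statement is the Claim_ definition above) =====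
theorem get_brand_tier_spec : Claim_equal_get_brand_tier := by
  intro brands _
  show get_brand_tier brands = get_brand_tier_alt brands
  simp only [get_brand_tier, get_brand_tier_alt]
  rw [pvScanA_eq_find, ← List.head?_filter, pvFilter_sorted, pvHead_sorted]
  cases hm : PySem.List.max? ((PySem.Dict.counter brands).items.filter (fun p => pvMatches p.1))
      (fun p => p.2) with
  | none => rfl
  | some best =>
    have hmem : best ∈ List.filter (fun p => pvMatches p.1) (PySem.Dict.counter brands).items :=
      PySem.List.max?_mem hm
    have hb : pvMatches best.1 = true := by
      have h0 := List.of_mem_filter hmem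
      simpa using h0
    show pvTier best.1 = pvLookupTier best.1
    rw [pvLookup_eq_tier best.1 hb]
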